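-- pv_equiv track=rewrite | github.com/VictorVVedtion/ouro-loop | framework.py | _file_in_danger_zone
-- ===== SOURCE A (Python) =====
-- from typing import Optional
--
-- def _file_in_danger_zone(file_path: str, danger_zones: list) -> Optional[str]:
--     """Check if a file path matches any DANGER ZONE pattern.
--
--     Uses path-segment-aware matching to avoid false positives:
--     - Zone "auth/" matches "auth/login.py" but NOT "unauthorized.py"
--     - Zone "auth/core.py" matches exactly that file
--     - Zone ending with "/" is treated as a directory prefix
--
--     Returns the matched zone pattern, or None if no match.
--     """
--     if not file_path:
--         return None
--
--     # Normalize separators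
--     norm_file = file_path.replace("\\", "/")
--     file_segments = norm_file.split("/")
--
--     for zone in danger_zones:
--         if not zone:
--             continue
--
--         norm_zone = zone.replace("\\", "/")
--
--         # Exact match
--         if norm_file == norm_zone:
--             return zone
--
--         # Directory prefix: zone "src/payments/" → file must start with that path
--         if norm_zone.endswith("/"):
--             if norm_file.startswith(norm_zone):
--                 return zone
--             continue
--
--         # File match: zone "auth/core.py" → exact path segment match
--         zone_segments = norm_zone.split("/")
--
--         # Check if zone segments appear as contiguous subsequence in file path
--         zone_len = len(zone_segments)
--         for i in range(len(file_segments) - zone_len + 1):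
--             if file_segments[i : i + zone_len] == zone_segments:
--                 return zone
--
--     return None
-- ===== SOURCE B (Python) =====
-- from typing import Optional
--
-- def _file_in_danger_zone(file_path: str, danger_zones: list) -> Optional[str]:
--     """Check if a file path matches any DANGER ZONE pattern.
--
--     Same matching rules as before, but the segment-window scan is replaced by
--     one delimiter-padded substring test: '/' + zone + '/' occurring inside
--     '/' + file + '/' is exactly a contiguous run of path segments.
--     """
--     if not file_path:
--         return None
--
--     norm_file = file_path.replace("\\", "/")
--     padded = "/" + norm_file + "/"
--
--     for zone in danger_zones:
--         if not zone:
--             continue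
--
--         norm_zone = zone.replace("\\", "/")
--
--         if norm_file == norm_zone:
--             return zone
--
--         if norm_zone.endswith("/"):
--             if norm_file.startswith(norm_zone):
--                 return zone
--             continue
--
--         if "/" + norm_zone + "/" in padded:
--             return zone
--
--     return None
-- ===== Notes on version B (the rewrite author's own statement) =====
-- stated objective: idiomatic
-- what changed: The precomputed segment list and the inner sliding-window index loop are removed: the file path is padded once to '/'+file+'/' and each non-directory zone is tested with a single delimited-substring membership '/'+zone+'/' in padded.
import Mathlib
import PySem

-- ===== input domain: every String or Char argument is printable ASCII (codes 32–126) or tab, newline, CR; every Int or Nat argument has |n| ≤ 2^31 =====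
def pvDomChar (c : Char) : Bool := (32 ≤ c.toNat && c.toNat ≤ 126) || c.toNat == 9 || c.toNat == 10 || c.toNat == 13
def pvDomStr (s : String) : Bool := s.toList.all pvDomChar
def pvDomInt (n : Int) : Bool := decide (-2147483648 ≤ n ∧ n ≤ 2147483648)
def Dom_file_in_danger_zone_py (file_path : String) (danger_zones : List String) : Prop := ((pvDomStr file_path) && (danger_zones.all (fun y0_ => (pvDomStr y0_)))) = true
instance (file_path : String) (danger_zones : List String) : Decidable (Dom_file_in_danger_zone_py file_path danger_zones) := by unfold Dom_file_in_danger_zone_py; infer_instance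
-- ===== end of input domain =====

-- B drops A's segment list and inner window scan: it pads the path once and tests '/'+zone+'/' as a substring (idiomatic).

-- ===== PORT A =====
-- str.split(sep) with sep = "/" (sep never empty), so Str.split? is always `some`.
def pvSplitStr (s sep : String) : List String := (PySem.Str.split? s sep).getD []

def fidzLoopA (norm_file : String) (file_segments : List String) : List String → Option String
  | [] => none
  | zone :: rest =>
    if zone = "" then fidzLoopA norm_file file_segments rest
    else
      let norm_zone := PySem.Str.replace zone "\\" "/"
      if norm_file = norm_zone then some zone
      else if PySem.Str.endswith norm_zone "/" then
        (if PySem.Str.startswith norm_file norm_zone then some zone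
         else fidzLoopA norm_file file_segments rest)
      else
        let zone_segments := pvSplitStr norm_zone "/"
        if ((PySem.List.pyRange 0 ((file_segments.length : Int) - (zone_segments.length : Int) + 1) 1).any
              (fun i => PySem.List.slice file_segments (some i) (some (i + (zone_segments.length : Int))) == zone_segments))
        then some zone
        else fidzLoopA norm_file file_segments rest

def file_in_danger_zone_py (file_path : String) (danger_zones : List String) : Option String :=
  if file_path = "" then none
  else
    let norm_file := PySem.Str.replace file_path "\\" "/"
    let file_segments := pvSplitStr norm_file "/"
    fidzLoopA norm_file file_segments danger_zones

-- ===== PORT B =====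
-- '"/" + s + "/"' and the substring test 'in' are ported on List Char (PySem.Chars.isIn); exact for str concatenation and 'in'.
def fidzLoopB (norm_file : String) (padded : List Char) : List String → Option String
  | [] => none
  | zone :: rest =>
    if zone = "" then fidzLoopB norm_file padded rest
    else
      let norm_zone := PySem.Str.replace zone "\\" "/"
      if norm_file = norm_zone then some zone
      else if PySem.Str.endswith norm_zone "/" then
        (if PySem.Str.startswith norm_file norm_zone then some zone
         else fidzLoopB norm_file padded rest)
      else if PySem.Chars.isIn ('/' :: norm_zone.toList ++ ['/']) padded then some zone
      else fidzLoopB norm_file padded rest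

def file_in_danger_zone_py_alt (file_path : String) (danger_zones : List String) : Option String :=
  if file_path = "" then none
  else
    let norm_file := PySem.Str.replace file_path "\\" "/"
    let padded := '/' :: norm_file.toList ++ ['/']
    fidzLoopB norm_file padded danger_zones

-- ===== PRECONDITION & SPEC =====
def Spec_file_in_danger_zone_py (file_path : String) (danger_zones : List String) (out : Option String) : Prop := out = file_in_danger_zone_py_alt file_path danger_zones
instance (file_path : String) (danger_zones : List String) (out : Option String) : Decidable (Spec_file_in_danger_zone_py file_path danger_zones out) := by unfold Spec_file_in_danger_zone_py; infer_instance

-- ===== CLAIM (what is proved, stated in full; the proofs are below) =====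
def Claim_equal_file_in_danger_zone_py : Prop := ∀ (file_path : String) (danger_zones : List String), Dom_file_in_danger_zone_py file_path danger_zones → Spec_file_in_danger_zone_py file_path danger_zones (file_in_danger_zone_py file_path danger_zones)

-- ===== LEMMAS AND PROOFS =====

-- structural single-char splitter: (first piece, later pieces)
def pvSplit (c : Char) : List Char → List Char × List (List Char)
  | [] => ([], [])
  | x :: xs =>
    let p := pvSplit c xs
    if x = c then ([], p.1 :: p.2) else (x :: p.1, p.2)

-- glue with a leading '/' before every piece
def pvG : List (List Char) → List Char
  | [] => []
  | h :: t => '/' :: h ++ pvG t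

def pvPad (l : List (List Char)) : List Char := pvG l ++ ['/']

theorem pvG_append (a b : List (List Char)) : pvG (a ++ b) = pvG a ++ pvG b := by
  induction a with
  | nil => rfl
  | cons h t ih => simp [pvG, ih]

theorem pvPad_head (l : List (List Char)) : (pvPad l).head? = some '/' := by
  cases l <;> simp [pvPad, pvG]

theorem pvPad_ne_nil (l : List (List Char)) : pvPad l ≠ [] := by
  simp [pvPad]

theorem pvSplit_join (c : Char) (l : List Char) :
    (pvSplit c l).1 ++ ((pvSplit c l).2.map (c :: ·)).flatten = l := by
  induction l with
  | nil => rfl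
  | cons x xs ih =>
    by_cases h : x = c <;> simp [pvSplit, h] <;> simpa [h] using ih

theorem pvSplit_no_c (c : Char) (l : List Char) :
    c ∉ (pvSplit c l).fst ∧ ∀ p ∈ (pvSplit c l).snd, c ∉ p := by
  induction l with
  | nil => simp [pvSplit]
  | cons x xs ih =>
    by_cases h : x = c
    · simp [pvSplit, h]
      exact ⟨ih.1, ih.2⟩
    · refine ⟨?_, by simpa [pvSplit, h] using ih.2⟩
      simp [pvSplit, h]
      exact ⟨fun hc => h hc.symm, ih.1⟩

-- PySem's splitOn on a single-char separator computes pvSplit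
theorem pvSplitOn_go (c : Char) : ∀ (fuel : Nat) (l cur : List Char) (acc : List (List Char)),
    l.length ≤ fuel →
    PySem.Chars.splitOn.go [c] fuel l cur acc
      = acc.reverse ++ (cur.reverse ++ (pvSplit c l).1) :: (pvSplit c l).2 := by
  intro fuel
  induction fuel with
  | zero =>
    intro l cur acc hl
    have : l = [] := List.length_eq_zero_iff.mp (Nat.le_zero.mp hl)
    subst this
    simp [PySem.Chars.splitOn.go, pvSplit]
  | succ n ih =>
    intro l cur acc hl
    cases l with
    | nil => simp [PySem.Chars.splitOn.go, pvSplit]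
    | cons x xs =>
      by_cases h : x = c
      · subst h
        have hpre : [x].isPrefixOf (x :: xs) = true := by simp [List.isPrefixOf]
        rw [PySem.Chars.splitOn.go]
        simp only [hpre, if_true]
        rw [ih _ _ _ (by simpa using Nat.le_of_succ_le_succ hl)]
        simp [pvSplit]
      · have hpre : [c].isPrefixOf (x :: xs) = false := by
          simp [List.isPrefixOf]
          intro hc; exact absurd hc.symm h
        rw [PySem.Chars.splitOn.go]
        simp only [hpre, Bool.false_eq_true, if_false]
        rw [ih _ _ _ (by simpa using Nat.le_of_succ_le_succ hl)]
        simp [pvSplit, h]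

-- full segment list of l
def pvSegs (c : Char) (l : List Char) : List (List Char) := (pvSplit c l).1 :: (pvSplit c l).2

theorem pvSplitOn_eq (c : Char) (l : List Char) :
    PySem.Chars.splitOn l [c] = pvSegs c l := by
  have := pvSplitOn_go c (l.length + 1) l [] [] (by omega)
  simpa [PySem.Chars.splitOn, pvSegs] using this

theorem pvSegs_clean (l : List Char) : ∀ p ∈ pvSegs '/' l, '/' ∉ p := by
  intro p hp
  rcases List.mem_cons.mp hp with h | h
  · exact h ▸ (pvSplit_no_c '/' l).1
  · exact (pvSplit_no_c '/' l).2 p h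

theorem pvPad_segs (l : List Char) : pvPad (pvSegs '/' l) = '/' :: l ++ ['/'] := by
  have hj := pvSplit_join '/' l
  simp only [pvPad, pvSegs, pvG]
  have hG : pvG (pvSplit '/' l).2 = ((pvSplit '/' l).2.map ('/' :: ·)).flatten := by
    generalize (pvSplit '/' l).2 = t
    induction t with
    | nil => rfl
    | cons h t ih => simp [pvG, ih]
  rw [hG]
  conv_rhs => rw [show l = (pvSplit '/' l).1 ++ ((pvSplit '/' l).2.map ('/' :: ·)).flatten from hj.symm]
  simp [List.append_assoc]

-- ---- prefix/infix transfer between segment lists and padded strings ----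
theorem pvS (z f a b : List Char) (hz : '/' ∉ z) (hf : '/' ∉ f)
    (ha : a.head? = some '/') (hb : b.head? = some '/')
    (h : z ++ a <+: f ++ b) : z = f ∧ a <+: b := by
  induction z generalizing f with
  | nil =>
    cases f with
    | nil => exact ⟨rfl, by simpa using h⟩
    | cons d f' =>
      exfalso
      cases a with
      | nil => simp at ha
      | cons x a' =>
        have hx : x = '/' := by simpa using ha
        simp only [List.nil_append, List.cons_append] at h
        rcases List.cons_prefix_cons.mp h with ⟨he, -⟩
        exact hf (by simp [← he, hx])
  | cons x z' ih =>
    cases f with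
    | nil =>
      exfalso
      cases b with
      | nil => simp at hb
      | cons y b' =>
        have hy : y = '/' := by simpa using hb
        simp only [List.cons_append, List.nil_append] at h
        rcases List.cons_prefix_cons.mp h with ⟨he, -⟩
        exact hz (by simp [he, hy])
    | cons d f' =>
      simp only [List.cons_append] at h
      rcases List.cons_prefix_cons.mp h with ⟨he, htl⟩
      have hrec := ih f' (fun m => hz (List.mem_cons_of_mem _ m))
        (fun m => hf (List.mem_cons_of_mem _ m)) htl
      exact ⟨by rw [he, hrec.1], hrec.2⟩

theorem pvQ (zs fs : List (List Char))
    (hzs : ∀ p ∈ zs, '/' ∉ p) (hfs : ∀ p ∈ fs, '/' ∉ p)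
    (h : pvPad zs <+: pvPad fs) : zs <+: fs := by
  induction zs generalizing fs with
  | nil => exact List.nil_prefix
  | cons z tz ih =>
    cases fs with
    | nil =>
      exfalso
      have hlen := h.length_le
      simp only [pvPad, pvG, List.length_append, List.length_cons, List.length_nil,
        List.nil_append] at hlen
      omega
    | cons f tf =>
      simp only [pvPad, pvG, List.cons_append, List.append_assoc] at h
      have h' : z ++ (pvG tz ++ ['/']) <+: f ++ (pvG tf ++ ['/']) :=
        (List.cons_prefix_cons.mp h).2
      have hS := pvS z f (pvG tz ++ ['/']) (pvG tf ++ ['/'])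
        (hzs z (by simp)) (hfs f (by simp))
        (pvPad_head tz) (pvPad_head tf) h'
      have hrec := ih tf (fun p m => hzs p (List.mem_cons_of_mem _ m))
        (fun p m => hfs p (List.mem_cons_of_mem _ m)) hS.2
      exact List.cons_prefix_cons.mpr ⟨hS.1, hrec⟩

theorem pvT (f : List Char) : ∀ (u X Y : List Char), '/' ∉ f → X.head? = some '/' →
    u ++ X = f ++ Y → f <+: u := by
  induction f with
  | nil => intro u X Y _ _ _; exact List.nil_prefix
  | cons d f' ih =>
    intro u X Y hf hX h
    cases u with
    | nil =>
      exfalso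
      cases X with
      | nil => simp at hX
      | cons x X' =>
        have hx : x = '/' := by simpa using hX
        simp only [List.nil_append, List.cons_append, List.cons_eq_cons] at h
        exact hf (by simp [← h.1, hx])
    | cons c u' =>
      simp only [List.cons_append, List.cons_eq_cons] at h
      have hrec := ih u' X Y (fun m => hf (List.mem_cons_of_mem _ m)) hX h.2
      exact List.cons_prefix_cons.mpr ⟨h.1.symm, hrec⟩

-- backward: padded infix implies segment infix
theorem pvR (zs : List (List Char)) (hzs : ∀ p ∈ zs, '/' ∉ p) :
    ∀ (fs : List (List Char)), (∀ p ∈ fs, '/' ∉ p) →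
    ∀ u v, u ++ pvPad zs ++ v = pvPad fs → zs <:+: fs := by
  intro fs
  induction fs with
  | nil =>
    intro hfs u v h
    cases u with
    | nil =>
      have hp : pvPad zs <+: pvPad [] := ⟨v, by simpa using h⟩
      exact (pvQ zs [] hzs hfs hp).isInfix
    | cons c u' =>
      exfalso
      have hlen : (c :: u' ++ pvPad zs ++ v).length = (pvPad ([] : List (List Char))).length := by
        rw [h]
      have h1 : 1 ≤ (pvPad zs).length := by
        have hne := pvPad_ne_nil zs
        cases hzs' : pvPad zs with
        | nil => exact absurd hzs' hne
        | cons a t => simp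
      simp only [List.length_append, List.length_cons, pvPad, pvG, List.length_nil,
        List.nil_append] at hlen h1
      omega
  | cons f tf ih =>
    intro hfs u v h
    cases u with
    | nil =>
      have hp : pvPad zs <+: pvPad (f :: tf) := ⟨v, by simpa using h⟩
      exact (pvQ zs (f :: tf) hzs hfs hp).isInfix
    | cons c u' =>
      have hexp : pvPad (f :: tf) = '/' :: (f ++ pvPad tf) := by
        simp [pvPad, pvG]
      rw [hexp] at h
      simp only [List.cons_append, List.cons_eq_cons] at h
      obtain ⟨-, h2⟩ := h
      have hhead : (pvPad zs ++ v).head? = some '/' := by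
        rw [List.head?_append, pvPad_head]
        rfl
      have hfpref : f <+: u' := pvT f u' (pvPad zs ++ v) (pvPad tf)
        (hfs f (by simp)) hhead (by simpa [List.append_assoc] using h2)
      obtain ⟨w, hw⟩ := hfpref
      have hw2 : w ++ pvPad zs ++ v = pvPad tf := by
        subst hw
        simp only [List.append_assoc] at h2 ⊢
        exact List.append_cancel_left h2
      have hrec := ih (fun p m => hfs p (List.mem_cons_of_mem _ m)) w v hw2
      exact hrec.trans (List.infix_cons_iff.mpr (Or.inr (List.infix_refl tf)))

-- forward: segment infix implies padded infix
theorem pvFwd (zs fs : List (List Char)) (h : zs <:+: fs) : pvPad zs <:+: pvPad fs := by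
  obtain ⟨a, b, hab⟩ := h
  subst hab
  cases b with
  | nil => exact ⟨pvG a, [], by simp [pvPad, pvG_append, List.append_assoc]⟩
  | cons p t =>
    exact ⟨pvG a, p ++ pvG t ++ ['/'], by simp [pvPad, pvG_append, pvG, List.append_assoc]⟩

theorem pvPad_infix_iff (zs fs : List (List Char))
    (hzs : ∀ p ∈ zs, '/' ∉ p) (hfs : ∀ p ∈ fs, '/' ∉ p) :
    pvPad zs <:+: pvPad fs ↔ zs <:+: fs := by
  constructor
  · rintro ⟨u, v, huv⟩
    exact pvR zs hzs fs hfs u v huv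
  · exact pvFwd zs fs

-- ---- A's window scan decides list infix ----
theorem pvWinAny {α : Type} [DecidableEq α] (fs zs : List α) :
    ((PySem.List.pyRange 0 ((fs.length : Int) - (zs.length : Int) + 1) 1).any
        (fun i => PySem.List.slice fs (some i) (some (i + (zs.length : Int))) == zs)) = true
      ↔ zs <:+: fs := by
  rw [PySem.List.pyRange_zero]
  simp only [List.any_map, List.any_eq_true, Function.comp, List.mem_range]
  constructor
  · rintro ⟨k, -, hk⟩
    rw [PySem.List.slice_natCast_add, beq_iff_eq] at hk
    exact hk ▸ ((List.take_prefix _ _).isInfix.trans (List.drop_suffix k fs).isInfix)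
  · rintro ⟨u, v, huv⟩
    refine ⟨u.length, ?_, ?_⟩
    · have : fs.length = u.length + zs.length + v.length := by
        rw [← huv]; simp; omega
      omega
    · rw [PySem.List.slice_natCast_add, beq_iff_eq, ← huv]
      simp

-- ---- the per-zone tests agree ----
theorem pvSplitStr_toList (s : String) :
    (pvSplitStr s "/").map String.toList = pvSegs '/' s.toList := by
  have h := PySem.Str.split?_map s "/"
  have hsep : ("/" : String).toList = ['/'] := rfl
  rw [hsep] at h
  unfold pvSplitStr
  cases hs : PySem.Str.split? s "/" with
  | none =>
    exfalso
    rw [hs] at h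
    simp [PySem.Chars.split?] at h
  | some l =>
    rw [hs] at h
    simp only [Option.map_some] at h
    rw [← pvSplitOn_eq]
    simp only [Option.getD_some]
    have : PySem.Chars.split? s.toList ['/'] = some (PySem.Chars.splitOn s.toList ['/']) := by
      simp [PySem.Chars.split?]
    rw [this] at h
    exact Option.some.inj h

theorem pvMapInfixIff (a b : List String) :
    a.map String.toList <:+: b.map String.toList ↔ a <:+: b := by
  constructor
  · intro h
    rcases List.infix_map_iff.mp h with ⟨l, hl, hmap⟩
    have hinj : Function.Injective String.toList := by
      intro x y hxy
      exact String.ext hxy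
    have : a = l := (List.map_injective_iff.mpr hinj) hmap
    exact this ▸ hl
  · intro h
    exact h.map _

theorem pvTestEq (nf nz : String) :
    ((PySem.List.pyRange 0 (((pvSplitStr nf "/").length : Int) - ((pvSplitStr nz "/").length : Int) + 1) 1).any
        (fun i => PySem.List.slice (pvSplitStr nf "/") (some i) (some (i + ((pvSplitStr nz "/").length : Int))) == pvSplitStr nz "/"))
      = PySem.Chars.isIn ('/' :: nz.toList ++ ['/']) ('/' :: nf.toList ++ ['/']) := by
  rw [Bool.eq_iff_iff, pvWinAny, PySem.Chars.isIn_iff_infix]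
  rw [← pvPad_segs nf.toList, ← pvPad_segs nz.toList]
  rw [pvPad_infix_iff _ _ (pvSegs_clean nz.toList) (pvSegs_clean nf.toList)]
  rw [← pvSplitStr_toList, ← pvSplitStr_toList]
  exact (pvMapInfixIff _ _).symm

-- ---- loops agree ----
theorem pvLoopEq (nf : String) (dz : List String) :
    fidzLoopA nf (pvSplitStr nf "/") dz = fidzLoopB nf ('/' :: nf.toList ++ ['/']) dz := by
  induction dz with
  | nil => rfl
  | cons zone rest ih =>
    rw [fidzLoopA, fidzLoopB]
    by_cases h0 : zone = ""
    · simp only [if_pos h0]; exact ih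
    · simp only [if_neg h0]
      by_cases h1 : nf = PySem.Str.replace zone "\\" "/"
      · simp only [if_pos h1]
      · simp only [if_neg h1]
        by_cases h2 : PySem.Str.endswith (PySem.Str.replace zone "\\" "/") "/" = true
        · simp only [if_pos h2]
          by_cases h3 : PySem.Str.startswith nf (PySem.Str.replace zone "\\" "/") = true
          · simp only [if_pos h3]
          · simp only [if_neg h3]; exact ih
        · simp only [if_neg h2]
          rw [pvTestEq nf (PySem.Str.replace zone "\\" "/")]
          by_cases h4 : PySem.Chars.isIn ('/' :: (PySem.Str.replace zone "\\" "/").toList ++ ['/'])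
              ('/' :: nf.toList ++ ['/']) = true
          · simp only [if_pos h4]
          · simp only [if_neg h4]; exact ih

-- ===== VERDICT (by name: the statement is the Claim_ definition above) =====
theorem file_in_danger_zone_py_spec : Claim_equal_file_in_danger_zone_py := by
  intro file_path danger_zones _
  unfold Spec_file_in_danger_zone_py file_in_danger_zone_py file_in_danger_zone_py_alt
  by_cases h : file_path = ""
  · simp [h]
  · simp only [h, if_false]
    exact pvLoopEq (PySem.Str.replace file_path "\\" "/") danger_zones
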